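-- pv_equiv track=rewrite | github.com/Kingstblib46/WinterCamp | Midium/1.py | solution
-- ===== SOURCE A (Python) =====
-- def solution(n: int, k: int, data: list) -> int:
--     """
--     Calculate the minimum cost for small R to complete the hiking trip.
--
--     Args:
--         n (int): Total number of days.
--         k (int): Maximum number of food units that can be carried.
--         data (List[int]): List containing the price of food at each day's supply station.
--
--     Returns:
--         int: The minimum total cost.
--     """
--     min_total_cost = 0
--     current_food = 0
--
--     for i in range(n):
--         # Find the next day with a cheaper price
--         next_cheaper_day = -1
--         for j in range(i + 1, n):
--             if data[j] < data[i]: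
--                 next_cheaper_day = j
--                 break
--
--         # Determine how many days we need to buy food for
--         if next_cheaper_day == -1:
--             days_to_buy = n - i
--         else:
--             days_to_buy = next_cheaper_day - i
--
--         # Calculate the required amount to buy
--         required = days_to_buy
--         buy = min(required - current_food, k - current_food)
--         buy = max(buy, 0)
--
--         min_total_cost += buy * data[i]
--         current_food += buy
--         # Consume one unit for today
--         current_food -= 1
--
--     return min_total_cost
-- ===== SOURCE B (Python) =====
-- def solution(n: int, k: int, data: list) -> int:
--     # Precompute next-strictly-cheaper day for every day with a monotonic
--     # stack (one right-to-left pass), then a single buying pass: O(n) total.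
--     nse = [-1] * max(n, 0)
--     stack = []  # indices to the right of i whose prices strictly increase from bottom to top
--     for i in reversed(range(n)):
--         while stack and data[stack[-1]] >= data[i]:
--             stack.pop()
--         if stack:
--             nse[i] = stack[-1]
--         stack.append(i)
--
--     cost = 0
--     food = 0
--     for i in range(n):
--         nc = nse[i]
--         days = (n - i) if nc == -1 else (nc - i)
--         buy = max(min(days - food, k - food), 0)
--         cost += buy * data[i]
--         food += buy - 1
--     return cost
-- ===== Notes on version B (the rewrite author's own statement) =====
-- stated objective: faster
-- what changed: A finds each day's next-cheaper day by an inner forward scan (O(n^2)); B precomputes all next-smaller-element indices with one right-to-left monotonic-stack pass and then does a single buying pass (O(n)).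
import Mathlib
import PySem

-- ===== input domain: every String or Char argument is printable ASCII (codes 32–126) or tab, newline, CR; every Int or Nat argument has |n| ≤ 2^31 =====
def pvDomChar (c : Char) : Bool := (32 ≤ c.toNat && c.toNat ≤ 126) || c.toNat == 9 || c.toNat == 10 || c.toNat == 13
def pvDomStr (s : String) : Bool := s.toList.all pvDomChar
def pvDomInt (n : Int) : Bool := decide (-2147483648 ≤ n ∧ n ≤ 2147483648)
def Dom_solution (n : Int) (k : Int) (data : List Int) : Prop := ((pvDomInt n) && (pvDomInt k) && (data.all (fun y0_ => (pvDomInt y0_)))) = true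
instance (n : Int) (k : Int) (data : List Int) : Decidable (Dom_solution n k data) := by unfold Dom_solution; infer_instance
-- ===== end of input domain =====

-- B replaces A's O(n^2) inner next-cheaper scan by a single monotonic-stack
-- pass precomputing all next-smaller indices (O(n)); same return value on Pre_.

-- ===== PORT A =====
-- inner loop: for j in range(i+1, n): if data[j] < data[i]: next_cheaper_day = j; break
def scanLoopA (data : List Int) (di : Int) : List Int → Int
  | [] => -1
  | j :: rest => if PySem.List.pyGetD data j 0 < di then j else scanLoopA data di rest

def solution (n : Int) (k : Int) (data : List Int) : Int :=
  ((PySem.List.pyRange 0 n 1).foldl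
    (fun (st : Int × Int) i =>
      let nc := scanLoopA data (PySem.List.pyGetD data i 0) (PySem.List.pyRange (i + 1) n 1)
      let days := if nc = -1 then n - i else nc - i
      let buy := max (min (days - st.2) (k - st.2)) 0
      (st.1 + buy * PySem.List.pyGetD data i 0, st.2 + buy - 1))
    (0, 0)).1

-- ===== PORT B =====
-- data[p] for a Nat index p (exact where p < data.length, which Pre_ ensures for all touched indices)
def dGet (data : List Int) (p : Nat) : Int := data.getD p 0

-- while stack and data[stack[-1]] >= data[i]: stack.pop()
def popGE (data : List Int) (di : Int) : List Nat → List Nat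
  | [] => []
  | t :: rest => if di ≤ dGet data t then popGE data di rest else t :: rest

-- for i in reversed(range(nn)): pop, record next smaller, push i; returns (stack, nse)
def buildLoop (data : List Int) (nn : Nat) (i : Nat) : List Nat × List Int :=
  if _h : i < nn then
    let pr := buildLoop data nn (i + 1)
    let st' := popGE data (dGet data i) pr.1
    let res' := match st' with
      | [] => pr.2
      | t :: _ => pr.2.set i (t : Int)
    (i :: st', res')
  else ([], List.replicate nn (-1))
termination_by nn - i

def solution_alt (n : Int) (k : Int) (data : List Int) : Int :=
  let nse := (buildLoop data n.toNat 0).2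
  ((PySem.List.pyRange 0 n 1).foldl
    (fun (st : Int × Int) i =>
      let nc := PySem.List.pyGetD nse i (-1)
      let days := if nc = -1 then n - i else nc - i
      let buy := max (min (days - st.2) (k - st.2)) 0
      (st.1 + buy * PySem.List.pyGetD data i 0, st.2 + buy - 1))
    (0, 0)).1

-- ===== PRECONDITION & SPEC =====
-- Pre_ excludes exactly the inputs where Python A raises IndexError (n exceeds len(data)).
def Pre_solution (n : Int) (k : Int) (data : List Int) : Prop := n ≤ (data.length : Int)
instance (n : Int) (k : Int) (data : List Int) : Decidable (Pre_solution n k data) := by unfold Pre_solution; infer_instance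
def pvWitness_solution : Int × Int × List Int := (3, 2, [3, 1, 2])

def Spec_solution (n : Int) (k : Int) (data : List Int) (out : Int) : Prop := out = solution_alt n k data
instance (n : Int) (k : Int) (data : List Int) (out : Int) : Decidable (Spec_solution n k data out) := by unfold Spec_solution; infer_instance

-- ===== CLAIM (what is proved, stated in full; the proofs are below) =====
def Claim_equal_solution : Prop := ∀ (n : Int) (k : Int) (data : List Int), Dom_solution n k data → Pre_solution n k data → Spec_solution n k data (solution n k data)

-- ===== LEMMAS AND PROOFS =====

-- first index j ∈ [a, nn) with data[j] < di (specification of A's inner scan)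
def scanF (data : List Int) (nn : Nat) (di : Int) (j : Nat) : Option Nat :=
  if _h : j < nn then
    (if dGet data j < di then some j else scanF data nn di (j + 1))
  else none
termination_by nn - j

theorem scanF_some (data : List Int) (nn : Nat) (di : Int) :
    ∀ j t, scanF data nn di j = some t →
      j ≤ t ∧ t < nn ∧ dGet data t < di ∧ ∀ p, j ≤ p → p < t → ¬ dGet data p < di := by
  have H : ∀ m j t, nn - j < m → scanF data nn di j = some t →
      j ≤ t ∧ t < nn ∧ dGet data t < di ∧ ∀ p, j ≤ p → p < t → ¬ dGet data p < di := by
    intro m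
    induction m with
    | zero => intro j t h; omega
    | succ m ih =>
      intro j t hm h
      rw [scanF] at h
      by_cases hj : j < nn
      · simp only [hj, dif_pos] at h
        by_cases hc : dGet data j < di
        · simp only [hc, if_pos] at h
          obtain rfl : j = t := Option.some.inj h
          exact ⟨le_refl _, hj, hc, fun p hp1 hp2 _ => by omega⟩
        · simp only [hc, if_neg, not_false_iff] at h
          obtain ⟨h1, h2, h3, h4⟩ := ih (j + 1) t (by omega) h
          refine ⟨by omega, h2, h3, ?_⟩
          intro p hp1 hp2
          rcases Nat.eq_or_lt_of_le hp1 with rfl | hlt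
          · exact hc
          · exact h4 p hlt hp2
      · simp only [hj, dif_neg, not_false_iff] at h
        cases h
  intro j t h
  exact H (nn - j + 1) j t (by omega) h

theorem scanF_none (data : List Int) (nn : Nat) (di : Int) :
    ∀ j, scanF data nn di j = none → ∀ p, j ≤ p → p < nn → ¬ dGet data p < di := by
  have H : ∀ m j, nn - j < m → scanF data nn di j = none →
      ∀ p, j ≤ p → p < nn → ¬ dGet data p < di := by
    intro m
    induction m with
    | zero => intro j h; omega
    | succ m ih =>
      intro j hm h p hp1 hp2
      rw [scanF] at h
      by_cases hj : j < nn
      · simp only [hj, dif_pos] at h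
        by_cases hc : dGet data j < di
        · simp [hc] at h
        · simp only [hc, if_neg, not_false_iff] at h
          rcases Nat.eq_or_lt_of_le hp1 with rfl | hlt
          · exact hc
          · exact ih (j + 1) (by omega) h p hlt hp2
      · omega
  intro j h
  exact H (nn - j + 1) j (by omega) h

theorem scanF_eq_none (data : List Int) (nn : Nat) (di : Int) :
    ∀ j, (∀ p, j ≤ p → p < nn → ¬ dGet data p < di) → scanF data nn di j = none := by
  have H : ∀ m j, nn - j < m → (∀ p, j ≤ p → p < nn → ¬ dGet data p < di) →
      scanF data nn di j = none := by
    intro m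
    induction m with
    | zero => intro j h; omega
    | succ m ih =>
      intro j hm hall
      rw [scanF]
      by_cases hj : j < nn
      · simp only [hj, dif_pos]
        rw [if_neg (hall j (le_refl _) hj)]
        exact ih (j + 1) (by omega) (fun p hp1 hp2 => hall p (by omega) hp2)
      · simp [hj]
  intro j h
  exact H (nn - j + 1) j (by omega) h

theorem scanF_skip (data : List Int) (nn : Nat) (di : Int) :
    ∀ a b, a ≤ b → (∀ p, a ≤ p → p < b → ¬ dGet data p < di) →
      scanF data nn di a = scanF data nn di b := by
  have H : ∀ m a b, b - a < m → a ≤ b → (∀ p, a ≤ p → p < b → ¬ dGet data p < di) →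
      scanF data nn di a = scanF data nn di b := by
    intro m
    induction m with
    | zero => intro a b h; omega
    | succ m ih =>
      intro a b hm hab hall
      rcases Nat.eq_or_lt_of_le hab with rfl | hlt
      · rfl
      · by_cases ha : a < nn
        · rw [scanF]
          simp only [ha, dif_pos]
          rw [if_neg (hall a (le_refl _) hlt)]
          exact ih (a + 1) b (by omega) (by omega) (fun p hp1 hp2 => hall p (by omega) hp2)
        · rw [scanF_eq_none data nn di a (fun p hp1 hp2 => by omega)]
          rw [scanF_eq_none data nn di b (fun p hp1 hp2 => by omega)]
  intro a b hab hall
  exact H (b - a + 1) a b (by omega) hab hall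

-- the chain of successive next-smaller indices starting at i (the stack contents, top first)
def nextI (data : List Int) (nn : Nat) (i : Nat) : Nat :=
  (scanF data nn (dGet data i) (i + 1)).getD nn

theorem nextI_gt (data : List Int) (nn : Nat) (i : Nat) (hi : i < nn) : i < nextI data nn i := by
  unfold nextI
  rcases hs : scanF data nn (dGet data i) (i + 1) with _ | t
  · simpa using hi
  · have := scanF_some data nn (dGet data i) (i + 1) t hs
    simp only [Option.getD_some]
    omega

def chain (data : List Int) (nn : Nat) (i : Nat) : List Nat :=
  if h : i < nn then i :: chain data nn (nextI data nn i) else []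
termination_by nn - i
decreasing_by
  have := nextI_gt data nn i h
  omega

theorem chain_nil (data : List Int) (nn : Nat) (i : Nat) (hi : ¬ i < nn) :
    chain data nn i = [] := by
  rw [chain]; simp [hi]

theorem chain_cons (data : List Int) (nn : Nat) (i : Nat) (hi : i < nn) :
    chain data nn i = i :: chain data nn (nextI data nn i) := by
  rw [chain]; simp [hi]

theorem pop_chain (data : List Int) (nn : Nat) (di : Int) :
    ∀ j, popGE data di (chain data nn j) =
      (match scanF data nn di j with
        | none => []
        | some t => chain data nn t) := by
  have H : ∀ m j, nn - j < m → popGE data di (chain data nn j) =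
      (match scanF data nn di j with
        | none => []
        | some t => chain data nn t) := by
    intro m
    induction m with
    | zero => intro j h; omega
    | succ m ih =>
      intro j hm
      by_cases hj : j < nn
      · rw [chain_cons data nn j hj]
        by_cases hc : dGet data j < di
        · -- stack top is already smaller: pop stops; scan finds j first
          have hs : scanF data nn di j = some j := by
            rw [scanF]; simp only [hj, dif_pos]; rw [if_pos hc]
          rw [hs]
          simp only [popGE]
          rw [if_neg (by omega)]
          exact (chain_cons data nn j hj).symm
        · -- data[j] ≥ di: top popped; continue in the tail of the chain
          have hstep : scanF data nn di j = scanF data nn di (j + 1) := by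
            rw [scanF]
            simp only [hj, dif_pos]
            rw [if_neg hc]
          simp only [popGE]
          rw [if_pos (by omega)]
          rcases hs : scanF data nn (dGet data j) (j + 1) with _ | t
          · have hnext : nextI data nn j = nn := by unfold nextI; rw [hs]; rfl
            rw [hnext, chain_nil data nn nn (by omega)]
            simp only [popGE]
            have hnone : scanF data nn di (j + 1) = none := by
              apply scanF_eq_none
              intro p hp1 hp2
              have := scanF_none data nn (dGet data j) (j + 1) hs p hp1 hp2
              omega
            rw [hstep, hnone]
          · have hnext : nextI data nn j = t := by unfold nextI; rw [hs]; rfl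
            obtain ⟨ht1, ht2, _ht3, ht4⟩ := scanF_some data nn (dGet data j) (j + 1) t hs
            have htail : scanF data nn di (j + 1) = scanF data nn di t := by
              apply scanF_skip data nn di (j + 1) t ht1
              intro p hp1 hp2
              have := ht4 p hp1 hp2
              omega
            rw [hnext, ih t (by omega), hstep, htail]
      · rw [chain_nil data nn j hj]
        simp only [popGE]
        rw [scanF_eq_none data nn di j (fun p hp1 hp2 => by omega)]
  intro j
  exact H (nn - j + 1) j (by omega)

-- spec of the nse list after the builder has processed indices nn-1 down to i
def resSpec (data : List Int) (nn : Nat) (i : Nat) : List Int :=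
  (List.range nn).map (fun p =>
    if i ≤ p then
      (match scanF data nn (dGet data p) (p + 1) with
        | none => -1
        | some t => (t : Int))
    else -1)

theorem build_spec (data : List Int) (nn : Nat) :
    ∀ i, buildLoop data nn i = (chain data nn i, resSpec data nn i) := by
  have H : ∀ m i, nn - i < m → buildLoop data nn i = (chain data nn i, resSpec data nn i) := by
    intro m
    induction m with
    | zero => intro i h; omega
    | succ m ih =>
      intro i hm
      rw [buildLoop]
      by_cases hi : i < nn
      · simp only [hi, dif_pos]
        rw [ih (i + 1) (by omega)]
        rw [Prod.mk.injEq]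
        rcases hs : scanF data nn (dGet data i) (i + 1) with _ | t
      -- the popped stack: via pop_chain
        · have hpop : popGE data (dGet data i) (chain data nn (i + 1)) = [] := by
            rw [pop_chain data nn (dGet data i) (i + 1), hs]
          simp only [hpop]
          constructor
          · have hnext : nextI data nn i = nn := by unfold nextI; rw [hs]; rfl
            rw [chain_cons data nn i hi, hnext, chain_nil data nn nn (by omega)]
          · unfold resSpec
            apply List.map_congr_left
            intro p hp
            rw [List.mem_range] at hp
            by_cases hpi : p = i
            · subst hpi
              rw [if_neg (by omega), if_pos (le_refl _), hs]
            · by_cases hle : i ≤ p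
              · rw [if_pos (by omega), if_pos hle]
              · rw [if_neg (by omega), if_neg hle]
        · have ht2 : t < nn := (scanF_some data nn (dGet data i) (i + 1) t hs).2.1
          have hpop : popGE data (dGet data i) (chain data nn (i + 1)) =
              t :: chain data nn (nextI data nn t) := by
            rw [pop_chain data nn (dGet data i) (i + 1), hs]
            exact chain_cons data nn t ht2
          simp only [hpop]
          constructor
          · have hnext : nextI data nn i = t := by unfold nextI; rw [hs]; rfl
            rw [chain_cons data nn i hi, hnext, chain_cons data nn t ht2]
          · apply List.ext_getElem
            · simp [resSpec]
            · intro p h1 h2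
              have hp : p < nn := by simpa [resSpec] using h2
              rw [List.getElem_set]
              unfold resSpec
              simp only [List.getElem_map, List.getElem_range]
              by_cases hpi : i = p
              · subst hpi
                rw [if_pos rfl, if_pos (le_refl _), hs]
              · rw [if_neg hpi]
                by_cases hle : i ≤ p
                · rw [if_pos (by omega), if_pos hle]
                · rw [if_neg (by omega), if_neg hle]
      · simp only [hi, dif_neg, not_false_iff]
        rw [Prod.mk.injEq]
        constructor
        · rw [chain_nil data nn i hi]
        · unfold resSpec
          have : ∀ p ∈ List.range nn,
              (if i ≤ p then
                (match scanF data nn (dGet data p) (p + 1) with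
                  | none => (-1 : Int)
                  | some t => (t : Int))
              else -1) = -1 := by
            intro p hp
            rw [List.mem_range] at hp
            rw [if_neg (by omega)]
          rw [List.map_congr_left this]
          simp [List.map_const']
  intro i
  exact H (nn - i + 1) i (by omega)

-- A's inner scan over pyRange equals the Int rendering of scanF
theorem scanA_eq (data : List Int) (nn : Nat) (di : Int) :
    ∀ a : Nat, scanLoopA data di (PySem.List.pyRange (a : Int) (nn : Int) 1) =
      (match scanF data nn di a with
        | none => -1
        | some t => (t : Int)) := by
  have H : ∀ m a, nn - a < m → scanLoopA data di (PySem.List.pyRange (a : Int) (nn : Int) 1) =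
      (match scanF data nn di a with
        | none => -1
        | some t => (t : Int)) := by
    intro m
    induction m with
    | zero => intro a h; omega
    | succ m ih =>
      intro a hm
      by_cases ha : a < nn
      · rw [PySem.List.pyRange_one_cons (by exact_mod_cast ha)]
        rw [scanLoopA]
        rw [scanF]
        simp only [ha, dif_pos]
        rw [PySem.List.pyGetD_natCast]
        by_cases hc : data.getD a 0 < di
        · rw [if_pos (show dGet data a < di from hc), if_pos hc]
        · rw [if_neg (show ¬ dGet data a < di from hc), if_neg hc]
          have : ((a : Int) + 1) = ((a + 1 : Nat) : Int) := by push_cast; ring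
          rw [this, ih (a + 1) (by omega)]
      · rw [PySem.List.pyRange_one_eq_nil (by exact_mod_cast (by omega : nn ≤ a))]
        rw [scanLoopA]
        rw [scanF_eq_none data nn di a (fun p hp1 hp2 => by omega)]
  intro a
  exact H (nn - a + 1) a (by omega)

-- ===== VERDICT (by name: the statement is the Claim_ definition above) =====
theorem solution_spec : Claim_equal_solution := by
  intro n k data _ _
  unfold Spec_solution solution solution_alt
  congr 1
  apply PySem.List.foldl_congr_mem
  intro acc x hx
  rw [PySem.List.mem_pyRange_one] at hx
  obtain ⟨hx0, hxn⟩ := hx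
  have hn0 : 0 < n := by omega
  have hxcast : x = ((x.toNat : Nat) : Int) := by omega
  set p := x.toNat with hp
  have hpn : p < n.toNat := by omega
  have hnse : (buildLoop data n.toNat 0).2 = resSpec data n.toNat 0 := by
    rw [build_spec]
  rw [hnse]
  have hget : PySem.List.pyGetD (resSpec data n.toNat 0) x (-1) =
      (match scanF data n.toNat (dGet data p) (p + 1) with
        | none => -1
        | some t => (t : Int)) := by
    rw [hxcast, PySem.List.pyGetD_natCast]
    have hlen : p < (resSpec data n.toNat 0).length := by simpa [resSpec] using hpn
    rw [List.getD_eq_getElem _ _ hlen]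
    unfold resSpec
    simp only [List.getElem_map, List.getElem_range]
    rw [if_pos (Nat.zero_le _)]
  have hdg : PySem.List.pyGetD data x 0 = dGet data p := by
    rw [hxcast, PySem.List.pyGetD_natCast]; rfl
  have hscan : scanLoopA data (PySem.List.pyGetD data x 0) (PySem.List.pyRange (x + 1) n 1) =
      (match scanF data n.toNat (dGet data p) (p + 1) with
        | none => -1
        | some t => (t : Int)) := by
    rw [hdg]
    have h1 : x + 1 = ((p + 1 : Nat) : Int) := by omega
    have h2 : n = ((n.toNat : Nat) : Int) := by omega
    rw [h1]
    rw [show PySem.List.pyRange (((p + 1 : Nat) : Int)) n 1 =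
        PySem.List.pyRange (((p + 1 : Nat) : Int)) ((n.toNat : Nat) : Int) 1 by rw [← h2]]
    exact scanA_eq data n.toNat (dGet data p) (p + 1)
  rw [hscan, hget]
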